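-- pv_equiv track=rewrite | github.com/realstok/work-2022-2023-labaratory-lab8 | materials/lab08.py | sub_noneg_ints
-- ===== SOURCE A (Python) =====
-- def sub_noneg_ints(u, v, b):
--     n = len(u)
--     j = n
--     k = 0
--     w = list()
--
--     for i in range(1, n+1):
--         w.append(
--             (int(u[n-i]) - int(v[n-i]) + k) % b
--         )
--
--         k = (int(u[n-i]) - int(v[n-i]) + k)//b
--         j = j - 1
--     w.reverse()
--     return w
-- ===== SOURCE B (Python) =====
-- def sub_noneg_ints(u, v, b):
--     n = len(u)
--     U = 0
--     V = 0
--     for i in range(n):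
--         U = U * b + int(u[i])
--         V = V * b + int(v[i])
--     d = (U - V) % (b ** n)
--     w = []
--     for _ in range(n):
--         d, r = divmod(d, b)
--         w.append(r)
--     w.reverse()
--     return w
-- ===== Notes on version B (the rewrite author's own statement) =====
-- stated objective: alternative
-- what changed: B replaces the per-digit borrow-propagation loop by whole-number arithmetic: it evaluates u and v as base-b integers with one Horner pass, reduces their difference modulo b**n (which reproduces A's discarded final borrow), and decodes that single number back into n base-b digits by repeated divmod.
import Mathlib
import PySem

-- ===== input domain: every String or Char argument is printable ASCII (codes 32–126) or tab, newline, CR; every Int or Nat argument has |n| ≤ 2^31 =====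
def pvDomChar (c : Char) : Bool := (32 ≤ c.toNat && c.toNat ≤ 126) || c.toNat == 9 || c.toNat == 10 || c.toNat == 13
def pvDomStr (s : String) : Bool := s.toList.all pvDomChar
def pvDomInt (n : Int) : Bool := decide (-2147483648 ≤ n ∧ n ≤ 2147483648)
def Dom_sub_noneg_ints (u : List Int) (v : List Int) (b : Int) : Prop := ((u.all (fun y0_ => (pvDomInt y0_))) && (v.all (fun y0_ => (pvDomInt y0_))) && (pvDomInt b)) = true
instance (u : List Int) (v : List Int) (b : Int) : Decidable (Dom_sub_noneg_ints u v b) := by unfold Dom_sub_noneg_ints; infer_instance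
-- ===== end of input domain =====

-- B reimplements A's borrow-propagating digit subtraction as Horner encoding, one
-- subtraction mod b^n, and a divmod decode pass (objective: alternative algorithm).

-- ===== PORT A =====
def sub_noneg_ints (u : List Int) (v : List Int) (b : Int) : List Int :=
  let n : Int := PySem.List.len u
  -- state (w, k, j) as in the Python; j is decremented but never used, as in A
  let st := (PySem.List.pyRange 1 (n + 1) 1).foldl
    (fun (st : List Int × Int × Int) (i : Int) =>
      (st.1 ++ [PySem.Int.mod (PySem.List.pyGetD u (n - i) 0 - PySem.List.pyGetD v (n - i) 0 + st.2.1) b],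
       PySem.Int.floordiv (PySem.List.pyGetD u (n - i) 0 - PySem.List.pyGetD v (n - i) 0 + st.2.1) b,
       st.2.2 - 1))
    ([], 0, n)
  st.1.reverse

-- ===== PORT B =====
def sub_noneg_ints_alt (u : List Int) (v : List Int) (b : Int) : List Int :=
  let n : Int := PySem.List.len u
  let uv := (PySem.List.pyRange 0 n 1).foldl
    (fun (p : Int × Int) (i : Int) =>
      (p.1 * b + PySem.List.pyGetD u i 0, p.2 * b + PySem.List.pyGetD v i 0)) (0, 0)
  let d := PySem.Int.mod (uv.1 - uv.2) (b ^ u.length)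
  let dec := (PySem.List.pyRange 0 n 1).foldl
    (fun (p : Int × List Int) (_ : Int) =>
      (PySem.Int.floordiv p.1 b, p.2 ++ [PySem.Int.mod p.1 b])) (d, [])
  dec.2.reverse

-- ===== PRECONDITION & SPEC =====
-- Pre_ excludes exactly the inputs on which the Python A raises: b = 0 with a nonempty u
-- (ZeroDivisionError) and v shorter than u (IndexError); B raises on the same inputs.
def Pre_sub_noneg_ints (u : List Int) (v : List Int) (b : Int) : Prop :=
  u = [] ∨ (b ≠ 0 ∧ u.length ≤ v.length)
instance (u : List Int) (v : List Int) (b : Int) : Decidable (Pre_sub_noneg_ints u v b) := by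
  unfold Pre_sub_noneg_ints; infer_instance

def pvWitness_sub_noneg_ints : List Int × List Int × Int := ([3, 1], [1, 2], 5)

def Spec_sub_noneg_ints (u : List Int) (v : List Int) (b : Int) (out : List Int) : Prop := out = sub_noneg_ints_alt u v b
instance (u : List Int) (v : List Int) (b : Int) (out : List Int) : Decidable (Spec_sub_noneg_ints u v b out) := by unfold Spec_sub_noneg_ints; infer_instance

-- ===== CLAIM (what is proved, stated in full; the proofs are below) =====
def Claim_equal_sub_noneg_ints : Prop := ∀ (u : List Int) (v : List Int) (b : Int), Dom_sub_noneg_ints u v b → Pre_sub_noneg_ints u v b → Spec_sub_noneg_ints u v b (sub_noneg_ints u v b)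

-- ===== LEMMAS AND PROOFS =====

-- the n low base-b digits of x, least significant first
def pvDigitsLow (b : Int) : Nat → Int → List Int
  | 0, _ => []
  | m + 1, x => PySem.Int.mod x b :: pvDigitsLow b m (PySem.Int.floordiv x b)

-- value of a least-significant-first digit list
def pvVal (b : Int) : List Int → Int
  | [] => 0
  | d :: ds => d + b * pvVal b ds

theorem pvDigitsLow_congr (b : Int) (hb : b ≠ 0) :
    ∀ (n : Nat) (x y : Int), b ^ n ∣ x - y → pvDigitsLow b n x = pvDigitsLow b n y := by
  intro n
  induction n with
  | zero => intro x y _; rfl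
  | succ m ih =>
    intro x y hdvd
    obtain ⟨c, hc⟩ := hdvd
    have hx : x = y + (b ^ m * c) * b := by rw [pow_succ] at hc; linarith
    subst hx
    simp only [pvDigitsLow, Int.add_mul_fmod_self_right, PySem.Int.mod, PySem.Int.floordiv,
      Int.add_mul_fdiv_right _ _ hb]
    exact congrArg _ (ih _ _ ⟨c, by ring⟩)

theorem pvVal_append (b : Int) (l : List Int) (x : Int) :
    pvVal b (l ++ [x]) = pvVal b l + b ^ l.length * x := by
  induction l with
  | nil => simp [pvVal]
  | cons d ds ih => simp [pvVal, ih, pow_succ]; ring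

theorem pvVal_sub (b : Int) : ∀ (xs ys : List Int), xs.length = ys.length →
    pvVal b (List.zipWith (fun a c => a - c) xs ys) = pvVal b xs - pvVal b ys := by
  intro xs
  induction xs with
  | nil => intro ys h; rw [List.length_nil] at h; cases ys with
    | nil => simp [pvVal]
    | cons y ys => simp at h
  | cons x xs ih =>
    intro ys h
    cases ys with
    | nil => simp at h
    | cons y ys => simp only [List.zipWith, pvVal, ih ys (by simpa using h)]; ring

-- Horner fold equals pvVal of the reverse
theorem pvHorner (b : Int) : ∀ (xs : List Int) (acc : Int),
    xs.foldl (fun a d => a * b + d) acc = acc * b ^ xs.length + pvVal b xs.reverse := by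
  intro xs
  induction xs with
  | nil => intro acc; simp [pvVal]
  | cons x xs ih =>
    intro acc
    simp only [List.foldl, ih, List.reverse_cons, pvVal_append, List.length_reverse,
      List.length_cons, pow_succ]
    ring

-- A's carry loop, stripped of the dead counter j, computes the low digits of the value
theorem pvLoopA (b : Int) (hb : b ≠ 0) : ∀ (ds : List Int) (w : List Int) (k : Int),
    (ds.foldl (fun (st : List Int × Int) (d : Int) =>
        (st.1 ++ [PySem.Int.mod (d + st.2) b], PySem.Int.floordiv (d + st.2) b)) (w, k)).1
      = w ++ pvDigitsLow b ds.length (pvVal b ds + k) := by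
  intro ds
  induction ds with
  | nil => intro w k; simp [pvDigitsLow]
  | cons d ds ih =>
    intro w k
    have hval : pvVal b (d :: ds) + k = (d + k) + pvVal b ds * b := by simp [pvVal]; ring
    rw [hval, List.foldl_cons, ih]
    simp only [pvDigitsLow, PySem.Int.mod, PySem.Int.floordiv, Int.add_mul_fmod_self_right,
      Int.add_mul_fdiv_right _ _ hb, List.length_cons, List.append_assoc, List.cons_append,
      List.nil_append]
    rw [add_comm (pvVal b ds) ((d + k).fdiv b)]

-- A's triple-state fold projects to the pair-state fold (j is dead)
theorem pvTriple (b : Int) : ∀ (l : List Int) (w : List Int) (k j : Int)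
    (f : Int → Int),
    (l.foldl (fun (st : List Int × Int × Int) (i : Int) =>
        (st.1 ++ [PySem.Int.mod (f i + st.2.1) b],
         PySem.Int.floordiv (f i + st.2.1) b, st.2.2 - 1)) (w, k, j)).1
      = (l.foldl (fun (st : List Int × Int) (i : Int) =>
          (st.1 ++ [PySem.Int.mod (f i + st.2) b],
           PySem.Int.floordiv (f i + st.2) b)) (w, k)).1 := by
  intro l
  induction l with
  | nil => intro w k j f; rfl
  | cons i l ih => intro w k j f; simp only [List.foldl]; exact ih _ _ _ f

-- B's decode loop ignores the range element and peels digits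
theorem pvLoopDec (b : Int) : ∀ (l : List Int) (x : Int) (w : List Int),
    (l.foldl (fun (p : Int × List Int) (_ : Int) =>
        (PySem.Int.floordiv p.1 b, p.2 ++ [PySem.Int.mod p.1 b])) (x, w)).2
      = w ++ pvDigitsLow b l.length x := by
  intro l
  induction l with
  | nil => intro x w; simp [pvDigitsLow]
  | cons i l ih =>
    intro x w
    simp only [List.foldl, ih, pvDigitsLow, List.length_cons, List.append_assoc,
      List.cons_append, List.nil_append]

-- the index map of A's loop lists the digit differences, least significant first
theorem pvMapRange (u v : List Int) (hlen : u.length ≤ v.length) :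
    (PySem.List.pyRange 1 ((u.length : Int) + 1) 1).map
        (fun i => PySem.List.pyGetD u ((u.length : Int) - i) 0
                  - PySem.List.pyGetD v ((u.length : Int) - i) 0)
      = (List.zipWith (fun a c => a - c) u (v.take u.length)).reverse := by
  apply List.ext_getElem
  · simp [PySem.List.length_pyRange_one]
    omega
  · intro t h1 h2
    have hlen1 : (PySem.List.pyRange 1 ((u.length : Int) + 1) 1).length = u.length := by
      simp [PySem.List.length_pyRange_one]
    have ht : t < u.length := by rw [List.length_map, hlen1] at h1; exact h1
    have hidx : (PySem.List.pyRange 1 ((u.length : Int) + 1) 1)[t]'(by rw [hlen1]; exact ht) = 1 + t :=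
      PySem.List.getElem_pyRange_one _ _ _ _
    have hnat : (u.length : Int) - (1 + (t : Int)) = ((u.length - 1 - t : Nat) : Int) := by
      omega
    have hu : PySem.List.pyGetD u ((u.length : Int) - (1 + (t : Int))) 0
        = u[u.length - 1 - t]'(by omega) := by
      rw [hnat]; exact PySem.List.pyGetD_natCast u _ 0 ▸ by
        simp [List.getD, List.getElem?_eq_getElem (by omega : u.length - 1 - t < u.length)]
    have hv : PySem.List.pyGetD v ((u.length : Int) - (1 + (t : Int))) 0
        = v[u.length - 1 - t]'(by omega) := by
      rw [hnat]; exact PySem.List.pyGetD_natCast v _ 0 ▸ by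
        simp [List.getD, List.getElem?_eq_getElem (by omega : u.length - 1 - t < v.length)]
    simp only [List.getElem_map, hidx, hu, hv, List.getElem_reverse, List.getElem_zipWith,
      List.getElem_take]
    congr 2 <;> · congr 1; simp [List.length_zipWith]; omega

-- pyGetD looks through take inside the bound
theorem pvGetD_take (v : List Int) (m : Nat) (i : Int) (d : Int)
    (h0 : 0 ≤ i) (hi : i < (m : Int)) :
    PySem.List.pyGetD (v.take m) i d = PySem.List.pyGetD v i d := by
  obtain ⟨k, rfl⟩ : ∃ k : Nat, i = (k : Int) := ⟨i.toNat, (Int.toNat_of_nonneg h0).symm⟩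
  have hk : k < m := by exact_mod_cast hi
  rw [PySem.List.pyGetD_natCast, PySem.List.pyGetD_natCast]
  simp [List.getD, hk]

-- the Horner loop over the first m entries of v, as a fold over v.take m
theorem pvFoldV (v : List Int) (b : Int) (m : Nat) (hm : m ≤ v.length) (init : Int) :
    (PySem.List.pyRange 0 (m : Int) 1).foldl
        (fun (a : Int) (i : Int) => a * b + PySem.List.pyGetD v i 0) init
      = (v.take m).foldl (fun (a : Int) (d : Int) => a * b + d) init := by
  rw [PySem.List.foldl_congr_mem _ _
      (fun (a i : Int) => a * b + PySem.List.pyGetD (v.take m) i 0) init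
      (by intro acc i hi
          rw [PySem.List.mem_pyRange_one] at hi
          simp [pvGetD_take v m i 0 hi.1 hi.2])]
  rw [show (m : Int) = ((v.take m).length : Int) by simp [List.length_take]; omega]
  exact PySem.List.foldl_pyRange_zero_pyGetD' (v.take m) 0 (fun a d => a * b + d) init

-- main equivalence for b ≠ 0 and v long enough
theorem pvMain (u v : List Int) (b : Int) (hb : b ≠ 0) (hlen : u.length ≤ v.length) :
    sub_noneg_ints u v b = sub_noneg_ints_alt u v b := by
  have hvlen : (v.take u.length).length = u.length := by
    simp [List.length_take]; omega
  simp only [sub_noneg_ints, sub_noneg_ints_alt, PySem.List.len_eq]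
  rw [pvTriple b _ [] 0 _ (fun i => PySem.List.pyGetD u ((u.length : Int) - i) 0
        - PySem.List.pyGetD v ((u.length : Int) - i) 0)]
  rw [← List.foldl_map (f := fun i => PySem.List.pyGetD u ((u.length : Int) - i) 0
        - PySem.List.pyGetD v ((u.length : Int) - i) 0)
      (g := fun (st : List Int × Int) (d : Int) =>
        (st.1 ++ [PySem.Int.mod (d + st.2) b], PySem.Int.floordiv (d + st.2) b))]
  rw [pvMapRange u v hlen, pvLoopA b hb]
  rw [PySem.List.foldl_prod_mk (f := fun (a : Int) (i : Int) => a * b + PySem.List.pyGetD u i 0)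
      (g := fun (a : Int) (i : Int) => a * b + PySem.List.pyGetD v i 0)]
  rw [PySem.List.foldl_pyRange_zero_pyGetD' u 0 (fun (a d : Int) => a * b + d) 0]
  rw [pvFoldV v b u.length hlen 0]
  rw [pvLoopDec b]
  rw [pvHorner b u 0, pvHorner b (v.take u.length) 0]
  simp only [List.nil_append, List.length_reverse, List.length_zipWith, hvlen, min_self,
    add_zero, zero_mul, zero_add, PySem.List.length_pyRange_one, Int.sub_zero, Int.toNat_natCast]
  congr 1
  rw [List.reverse_zipWith (by omega : u.length = (v.take u.length).length),
    pvVal_sub b _ _ (by simp [hvlen])]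
  apply pvDigitsLow_congr b hb
  refine ⟨(pvVal b u.reverse - pvVal b (v.take u.length).reverse).fdiv (b ^ u.length), ?_⟩
  have h := Int.fdiv_mul_add_fmod (pvVal b u.reverse - pvVal b (v.take u.length).reverse) (b ^ u.length)
  simp only [PySem.Int.mod]
  linarith

-- ===== VERDICT (by name: the statement is the Claim_ definition above) =====
theorem sub_noneg_ints_spec : Claim_equal_sub_noneg_ints := by
  intro u v b _ hpre
  unfold Spec_sub_noneg_ints
  rcases hpre with h | ⟨hb, hlen⟩
  · subst h; rfl
  · exact pvMain u v b hb hlen
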